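-- pv_equiv track=rewrite | github.com/byeol3325/code_studying | 프로그래머스/2/148653. 마법의 엘리베이터/마법의 엘리베이터.py | solution
-- ===== SOURCE A (Python) =====
-- def solution(storey):
--     answer = 0
--
--     # 합이 음수면 움직이지 않음
--     # 규칙이 존재함.
--     cnt = 0
--     while storey != 0:
--         if storey%10 < 5:
--             cnt += storey%10
--             storey = storey//10
--         elif storey%10 > 5:
--             cnt += (10 - storey%10)
--             storey = storey//10 + 1
--         else: # storey%10 == 5:
--             if (storey//10)%10 >= 5:
--                 cnt += (10 - storey%10)
--                 storey = storey//10 + 1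
--             else:
--                 cnt += storey%10
--                 storey = storey//10
--     return cnt
-- ===== SOURCE B (Python) =====
-- def solution(storey):
--     n = abs(storey)
--     digits = []
--     while n:
--         digits.append(n % 10)
--         n //= 10
--     f, g = 0, 1
--     for d in reversed(digits):
--         f, g = min(d + f, (10 - d) + g), (g if d == 9 else min(d + 1 + f, (9 - d) + g))
--     return f
-- ===== Notes on version B (the rewrite author's own statement) =====
-- stated objective: alternative
-- what changed: Replaces A's greedy least-significant-digit loop with its one-digit-lookahead tie-break on middle digits by a two-state dynamic program over the digits of |storey| (most significant first), maintaining the pair (min cost to clear the prefix read so far, min cost to clear that prefix incremented).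
import Mathlib
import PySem

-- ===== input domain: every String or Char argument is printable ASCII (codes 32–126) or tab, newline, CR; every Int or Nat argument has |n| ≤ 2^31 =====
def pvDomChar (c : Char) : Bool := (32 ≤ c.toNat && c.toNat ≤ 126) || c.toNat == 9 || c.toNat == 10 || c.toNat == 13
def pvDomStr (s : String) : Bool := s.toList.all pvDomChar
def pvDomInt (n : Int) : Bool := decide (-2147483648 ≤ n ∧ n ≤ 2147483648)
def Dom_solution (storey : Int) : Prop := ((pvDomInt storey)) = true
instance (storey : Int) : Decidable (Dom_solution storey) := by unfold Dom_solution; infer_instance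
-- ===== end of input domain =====

-- B replaces A's greedy digit loop (with its one-digit lookahead tie-break) by a two-state
-- dynamic program over the digits of |storey|, most significant first; alternative algorithm, same cost.

-- ===== PORT A =====
-- the while loop of A: state = (storey, cnt)
def solutionLoop (storey cnt : Int) : Int :=
  if storey = 0 then cnt
  else if PySem.Int.mod storey 10 < 5 then
    solutionLoop (PySem.Int.floordiv storey 10) (cnt + PySem.Int.mod storey 10)
  else if 5 < PySem.Int.mod storey 10 then
    solutionLoop (PySem.Int.floordiv storey 10 + 1) (cnt + (10 - PySem.Int.mod storey 10))
  else if 5 ≤ PySem.Int.mod (PySem.Int.floordiv storey 10) 10 then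
    solutionLoop (PySem.Int.floordiv storey 10 + 1) (cnt + (10 - PySem.Int.mod storey 10))
  else
    solutionLoop (PySem.Int.floordiv storey 10) (cnt + PySem.Int.mod storey 10)
termination_by storey.natAbs
decreasing_by
  all_goals
    simp only [PySem.Int.floordiv_eq_ediv_of_pos (a := storey) (show (0:Int) < 10 by norm_num),
      PySem.Int.mod_eq_emod_of_pos (a := storey) (show (0:Int) < 10 by norm_num)] at *
  all_goals omega

def solution (storey : Int) : Int := solutionLoop storey 0

-- ===== PORT B =====
-- digits of n, least significant first (Source B's first while loop); the n ≤ 0 guard only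
-- totalizes the function: B calls it with n = |storey| ≥ 0, where it matches Python exactly
-- (`/` and `%` on Int agree with Python's // and % for the positive divisor 10)
def pvDigits (n : Int) : List Int :=
  if n ≤ 0 then [] else n % 10 :: pvDigits (n / 10)
termination_by n.toNat
decreasing_by omega

-- one step of the DP: p = (cost to clear the prefix read so far, cost to clear prefix+1)
def pvStep (p : Int × Int) (d : Int) : Int × Int :=
  (min (d + p.1) ((10 - d) + p.2),
   if d = 9 then p.2 else min ((d + 1) + p.1) ((9 - d) + p.2))

def solution_alt (storey : Int) : Int :=
  (((pvDigits |storey|).reverse).foldl pvStep (0, 1)).1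

-- ===== PRECONDITION & SPEC =====
def Spec_solution (storey : Int) (out : Int) : Prop := out = solution_alt storey
instance (storey : Int) (out : Int) : Decidable (Spec_solution storey out) := by unfold Spec_solution; infer_instance

-- ===== CLAIM (what is proved, stated in full; the proofs are below) =====
def Claim_equal_solution : Prop := ∀ (storey : Int), Dom_solution storey → Spec_solution storey (solution storey)

-- ===== LEMMAS AND PROOFS =====

theorem loop_shift : ∀ (k : Nat) (n : Int), n.natAbs = k → ∀ c, solutionLoop n c = c + solutionLoop n 0 := by
  intro k
  induction k using Nat.strong_induction_on with
  | _ k IH =>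
    intro n hk c
    rw [solutionLoop.eq_def, solutionLoop.eq_def (storey := n) (cnt := 0)]
    simp only [PySem.Int.floordiv_eq_ediv_of_pos (a := n) (show (0:Int) < 10 by norm_num),
      PySem.Int.mod_eq_emod_of_pos (a := n) (show (0:Int) < 10 by norm_num)]
    by_cases h0 : n = 0
    · simp [h0]
    · simp only [h0, if_false]
      have IH' : ∀ (n' : Int), n'.natAbs < k → ∀ c', solutionLoop n' c' = c' + solutionLoop n' 0 :=
        fun n' h c' => IH _ h n' rfl c'
      split_ifs with h1 h2 h3
      all_goals rw [IH' _ (by omega)]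
      all_goals (conv_rhs => rw [IH' _ (by omega)])
      all_goals ring

theorem G_zero : solution 0 = 0 := by
  rw [solution, solutionLoop.eq_def]; simp

theorem G_step (n : Int) (h : n ≠ 0) :
    solution n =
      if n % 10 < 5 then n % 10 + solution (n / 10)
      else if 5 < n % 10 then (10 - n % 10) + solution (n / 10 + 1)
      else if 5 ≤ (n / 10) % 10 then (10 - n % 10) + solution (n / 10 + 1)
      else n % 10 + solution (n / 10) := by
  rw [solution, solutionLoop.eq_def]
  simp only [PySem.Int.floordiv_eq_ediv_of_pos (show (0:Int) < 10 by norm_num),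
    PySem.Int.mod_eq_emod_of_pos (show (0:Int) < 10 by norm_num), h, if_false]
  split_ifs with h1 h2 h3
  all_goals rw [loop_shift _ _ rfl]
  all_goals simp [solution]

theorem G_joint : ∀ (k : Nat) (n : Int), 0 ≤ n → n.toNat = k →
    (solution n ≤ solution (n + 1) + 1 ∧ solution (n + 1) ≤ solution n + 1 ∧
     (5 ≤ n % 10 → solution (n + 1) ≤ solution n) ∧ (n % 10 < 5 → solution n ≤ solution (n + 1))) := by
  intro k
  induction k using Nat.strong_induction_on with
  | _ k IH =>
    intro n hn hk
    by_cases h0 : n = 0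
    · subst h0
      have e1 : solution 1 = 1 := by
        rw [G_step 1 one_ne_zero]; norm_num [G_zero]
      rw [G_zero] at *
      norm_num [e1]
    · have hn1 : n + 1 ≠ 0 := by omega
      obtain ⟨L1, L2, M1, M2⟩ := IH (n / 10).toNat (by omega) (n / 10) (by omega) rfl
      rw [G_step n h0, G_step (n + 1) hn1]
      by_cases hq5 : 5 ≤ (n / 10) % 10
      · have M1' := M1 hq5
        by_cases hr9 : n % 10 = 9
        · have e1 : (n + 1) % 10 = 0 := by omega
          have e2 : (n + 1) / 10 = n / 10 + 1 := by omega
          rw [e1, e2, hr9]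
          norm_num
          exact ⟨by linarith, by linarith⟩
        · have e1 : (n + 1) % 10 = n % 10 + 1 := by omega
          have e2 : (n + 1) / 10 = n / 10 := by omega
          rw [e1, e2]
          split_ifs <;>
            refine ⟨by linarith, by linarith, fun h5 => by linarith, fun h5 => by linarith⟩
      · have M2' := M2 (by omega)
        by_cases hr9 : n % 10 = 9
        · have e1 : (n + 1) % 10 = 0 := by omega
          have e2 : (n + 1) / 10 = n / 10 + 1 := by omega
          rw [e1, e2, hr9]
          norm_num
          exact ⟨by linarith, by linarith⟩
        · have e1 : (n + 1) % 10 = n % 10 + 1 := by omega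
          have e2 : (n + 1) / 10 = n / 10 := by omega
          rw [e1, e2]
          split_ifs <;>
            refine ⟨by linarith, by linarith, fun h5 => by linarith, fun h5 => by linarith⟩

theorem pair_lemma : ∀ (k : Nat) (n : Int), 0 ≤ n → n.toNat = k →
    ((pvDigits n).reverse.foldl pvStep (0, 1)) = (solution n, solution (n + 1)) := by
  intro k
  induction k using Nat.strong_induction_on with
  | _ k IH =>
    intro n hn hk
    by_cases h0 : n = 0
    · subst h0
      have e1 : solution 1 = 1 := by rw [G_step 1 one_ne_zero]; norm_num [G_zero]
      rw [pvDigits]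
      norm_num [G_zero, e1]
    · rw [pvDigits, if_neg (by omega : ¬ n ≤ 0), List.reverse_cons, List.foldl_append,
        IH (n / 10).toNat (by omega) (n / 10) (by omega) rfl]
      simp only [List.foldl_cons, List.foldl_nil]
      have hn1 : n + 1 ≠ 0 := by omega
      obtain ⟨L1, L2, M1, M2⟩ := G_joint (n / 10).toNat (n / 10) (by omega) rfl
      rw [G_step n h0, G_step (n + 1) hn1]
      by_cases hr9 : n % 10 = 9
      · have e1 : (n + 1) % 10 = 0 := by omega
        have e2 : (n + 1) / 10 = n / 10 + 1 := by omega
        rw [e1, e2]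
        by_cases hq5 : 5 ≤ (n / 10) % 10
        · have M' := M1 hq5
          simp only [pvStep, Prod.mk.injEq]
          generalize solution (n / 10 + 1) = b at *
          generalize solution (n / 10) = a at *
          split_ifs <;> omega
        · have M' := M2 (by omega)
          simp only [pvStep, Prod.mk.injEq]
          generalize solution (n / 10 + 1) = b at *
          generalize solution (n / 10) = a at *
          split_ifs <;> omega
      · have e1 : (n + 1) % 10 = n % 10 + 1 := by omega
        have e2 : (n + 1) / 10 = n / 10 := by omega
        rw [e1, e2]
        by_cases hq5 : 5 ≤ (n / 10) % 10
        · have M' := M1 hq5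
          simp only [pvStep, Prod.mk.injEq]
          generalize solution (n / 10 + 1) = b at *
          generalize solution (n / 10) = a at *
          split_ifs <;> omega
        · have M' := M2 (by omega)
          simp only [pvStep, Prod.mk.injEq]
          generalize solution (n / 10 + 1) = b at *
          generalize solution (n / 10) = a at *
          split_ifs <;> omega

theorem G_neg : ∀ (k : Nat) (n : Int), n < 0 → n.natAbs = k → solution n = solution (-n) := by
  intro k
  induction k using Nat.strong_induction_on with
  | _ k IH =>
    intro n hn hk
    have h0 : n ≠ 0 := by omega
    have hm0 : -n ≠ 0 := by omega
    have hq1 : n / 10 ≤ -1 := by omega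
    rw [G_step n h0, G_step (-n) hm0]
    by_cases hd0 : n % 10 = 0
    · have em : (-n) % 10 = 0 := by omega
      have eq : (-n) / 10 = -(n / 10) := by omega
      rw [em, eq, hd0]
      rw [if_pos (by omega : (0:Int) < 5), if_pos (by omega : (0:Int) < 5)]
      rw [IH (n / 10).natAbs (by omega) (n / 10) (by omega) rfl]
    · have eq : (-n) / 10 = -(n / 10) - 1 := by omega
      have em : (-n) % 10 = 10 - n % 10 := by omega
      by_cases hd5 : n % 10 = 5
      · have em2 : (-(n / 10) - 1) % 10 = 9 - (n / 10) % 10 := by omega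
        rw [em, eq, em2, hd5]
        norm_num
        by_cases hc : 5 ≤ (n / 10) % 10
        · rw [if_pos hc, if_neg (by omega : ¬ 5 ≤ 9 - (n / 10) % 10)]
          try rw [show -(n / 10) - 1 = -(n / 10 + 1) from by ring]
          by_cases hz : n / 10 + 1 = 0
          · rw [hz]; norm_num
          · rw [IH (n / 10 + 1).natAbs (by omega) (n / 10 + 1) (by omega) rfl]
        · rw [if_neg hc, if_pos (by omega : 5 ≤ 9 - (n / 10) % 10)]
          rw [IH (n / 10).natAbs (by omega) (n / 10) (by omega) rfl]
      · by_cases hd4 : n % 10 < 5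
        · rw [if_pos hd4, em, eq]
          rw [if_neg (by omega : ¬ (10 - n % 10 < 5)), if_pos (by omega : 5 < 10 - n % 10)]
          try rw [show -(n / 10) - 1 + 1 = -(n / 10) from by ring]
          rw [IH (n / 10).natAbs (by omega) (n / 10) (by omega) rfl]
          ring
        · rw [if_neg hd4, if_pos (by omega : 5 < n % 10), em, eq]
          rw [if_pos (by omega : 10 - n % 10 < 5)]
          try rw [show -(n / 10) - 1 = -(n / 10 + 1) from by ring]
          by_cases hz : n / 10 + 1 = 0
          · rw [hz]; norm_num
          · rw [IH (n / 10 + 1).natAbs (by omega) (n / 10 + 1) (by omega) rfl]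

-- ===== VERDICT (by name: the statement is the Claim_ definition above) =====
theorem solution_spec : Claim_equal_solution := by
  intro storey _
  unfold Spec_solution solution_alt
  have h0 : (0:Int) ≤ |storey| := abs_nonneg _
  rw [pair_lemma (|storey|).toNat (|storey|) h0 rfl]
  rcases lt_or_ge storey 0 with h | h
  · rw [G_neg storey.natAbs storey h rfl]
    congr 1
    rw [abs_of_neg h]
  · congr 1
    rw [abs_of_nonneg h]
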